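/- GENERATED by farm/mkstatement.py from design/units.tsv (unit `DGifGetWord.P`) and the assertions of Gif/Spec/ReaderSegs.lean — do not edit.
   THE STATEMENT of the proof unit `DGifGetWord.P`: segment P of `DGifGetWord` (13 instructions; entries 0x106020;
   exits 0x106063; ranges 0x106020-0x106063)
   takes each of its entry assertions to one of its exit assertions (`Gif.Spec.DGifGetWord.SegP`), given the contracts of its callees.
   What the names mean: ProgX/Base/Spec/Basic.lean (the shared hypotheses), Gif/Spec/ReaderSegs.lean (the assertions). The theorem to prove:
   `theorem DGifGetWord_P_ok : Gif.Spec.DGifGetWord_P.Statement`. -/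
import Gif.Code
import Gif.Dec.All
import Gif.Labels
import Gif.Spec.ReaderSegs
namespace Gif.Spec.DGifGetWord_P
open X86 X86.User Asan

/-- The statement of unit `DGifGetWord.P`. -/
def Statement : Prop :=
  ∀ (Lay : Layout) (_hLay : Lay.hi = 0x1000000) (μ : Microarch) (_hμ : UserX.MicroOK μ) (u₀ : State)
    (_hcode : HasCodeNat Lay u₀ Gif.L.DGifGetWord.entry Gif.Code.code_DGifGetWord.nat Gif.L.DGifGetWord.size),
    Gif.Spec.DGifGetWord.SegP Lay μ u₀

end Gif.Spec.DGifGetWord_P
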